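-- pv_equiv track=rewrite | github.com/pypi-data/pypi-mirror-11 | packages/miniorm/miniorm-1.0.tar.gz/miniorm-1.0/miniorm/db.py | combine_fields
-- ===== SOURCE A (Python) =====
-- def combine_fields(params):
--     fields = []
--     vals = []
--     for field, val in params.items():
--         if field.endswith("$like"):
--             fields.append("`%s` like %%s " % field[:-5])
--         elif field.endswith("$gt"):
--             fields.append("`%s` > %%s " % field[:-3])
--         elif field.endswith("$gte"):
--             fields.append("`%s` >= %%s " % field[:-4])
--         elif field.endswith("$gl"):
--             fields.append("`%s` < %%s " % field[:-3])
--         elif field.endswith("$gle"):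
--             fields.append("`%s` <= %%s " % field[:-4])
--         else:
--             fields.append("`%s` =%%s " % field)
--
--         if field.endswith("$like"):
--             vals.append("%%%s%%" % val)
--         else:
--             vals.append(val)
--     return fields, vals
-- ===== SOURCE B (Python) =====
-- JOIN = {'like': ' like ', 'gt': ' > ', 'gte': ' >= ', 'gl': ' < ', 'gle': ' <= '}
--
--
-- def combine_fields(params):
--     # stage 1: split every key at its last '$' and classify it once into
--     # (shown_name, operator-or-None)
--     named = []
--     for field in params:
--         name, sep, op = field.rpartition('$')
--         named.append((name, op) if sep and op in JOIN else (field, None))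
--     # stage 2: every field condition comes from the one uniform template
--     fields = ['`%s`%s%%s ' % (name, JOIN.get(op, ' =')) for name, op in named]
--     # stage 3: the values in their own pass
--     vals = ['%%%s%%' % val if op == 'like' else val
--             for (_, op), val in zip(named, params.values())]
--     return fields, vals
-- ===== Notes on version B (the rewrite author's own statement) =====
-- stated objective: alternative
-- what changed: A is one loop that classifies each key twice through a five-way endswith chain with hard-coded slice lengths and six distinct format strings; B is staged: one pass splits every key at its last '$' into an intermediate (name, operator) table, then fields and vals are each produced by their own comprehension pass over that table, all conditions coming from a single uniform template with an operator-to-joiner dict.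
import Mathlib
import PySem

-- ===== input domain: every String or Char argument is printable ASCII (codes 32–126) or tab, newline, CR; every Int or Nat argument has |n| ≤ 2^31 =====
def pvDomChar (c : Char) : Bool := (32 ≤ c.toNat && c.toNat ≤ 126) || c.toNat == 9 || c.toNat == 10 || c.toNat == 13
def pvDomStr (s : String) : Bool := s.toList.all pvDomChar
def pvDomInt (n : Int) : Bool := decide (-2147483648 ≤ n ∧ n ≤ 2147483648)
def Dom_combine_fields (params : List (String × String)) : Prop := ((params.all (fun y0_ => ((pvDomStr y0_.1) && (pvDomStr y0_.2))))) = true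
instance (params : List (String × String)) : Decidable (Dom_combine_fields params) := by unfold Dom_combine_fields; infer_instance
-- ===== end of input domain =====

-- B replaces A's single loop (two endswith chains, six format strings) by staged passes:
-- one pass classifies every key at its last '$' into an intermediate (name, operator)
-- table, then fields and vals are each built by their own pass over that table, all
-- conditions from one uniform template with a joiner dict (objective: alternative).

-- ===== PORT A =====
-- the field string A appends for one key (the if/elif/else chain, in A's order)
def pvFmtA (f : List Char) : List Char :=
  if PySem.Chars.endswith f "$like".toList then
    '`' :: PySem.List.slice f none (some (-5)) ++ "` like %s ".toList
  else if PySem.Chars.endswith f "$gt".toList then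
    '`' :: PySem.List.slice f none (some (-3)) ++ "` > %s ".toList
  else if PySem.Chars.endswith f "$gte".toList then
    '`' :: PySem.List.slice f none (some (-4)) ++ "` >= %s ".toList
  else if PySem.Chars.endswith f "$gl".toList then
    '`' :: PySem.List.slice f none (some (-3)) ++ "` < %s ".toList
  else if PySem.Chars.endswith f "$gle".toList then
    '`' :: PySem.List.slice f none (some (-4)) ++ "` <= %s ".toList
  else
    '`' :: f ++ "` =%s ".toList

-- the val string A appends for one key
def pvValA (f v : List Char) : List Char :=
  if PySem.Chars.endswith f "$like".toList then '%' :: v ++ ['%'] else v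

def combine_fields (params : List (String × String)) : List String × List String :=
  params.foldl
    (fun acc fv =>
      (acc.1 ++ [String.ofList (pvFmtA fv.1.toList)],
       acc.2 ++ [String.ofList (pvValA fv.1.toList fv.2.toList)]))
    ([], [])

-- ===== PORT B =====
-- B's module-level table JOIN : operator token → the SQL joiner between `name` and %s
def pvJoin : PySem.Dict (List Char) (List Char) :=
  PySem.Dict.ofList
    [("like".toList, " like ".toList),
     ("gt".toList,   " > ".toList),
     ("gte".toList,  " >= ".toList),
     ("gl".toList,   " < ".toList),
     ("gle".toList,  " <= ".toList)]

-- stage 1 of B, after the split: t/rest are the two halves of the reversed field at its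
-- first '$' (= field.rpartition('$'), which PySem has no primitive for; this hand port is
-- exact: splitting the reverse at its FIRST '$' is splitting the field at its LAST '$').
-- '(name, op) if sep and op in JOIN else (field, None)'
def pvClassify2 (t rest f : List Char) : List Char × Option (List Char) :=
  if rest ≠ [] ∧ PySem.Dict.contains pvJoin t.reverse = true then
    (rest.tail.reverse, some t.reverse)
  else (f, none)

def pvClassify (f : List Char) : List Char × Option (List Char) :=
  pvClassify2 (f.reverse.takeWhile (fun c => c ≠ '$')) (f.reverse.dropWhile (fun c => c ≠ '$')) f

-- stage 2 of B: the uniform template '`%s`%s%%s ' % (name, JOIN.get(op, ' ='))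
def pvField (p : List Char × Option (List Char)) : List Char :=
  '`' :: p.1 ++ '`' ::
    ((match p.2 with
      | some o => PySem.Dict.getD pvJoin o " =".toList
      | none => " =".toList) ++ "%s ".toList)

-- stage 3 of B: '%%%s%%' % val if op == 'like' else val
def pvVal (op : Option (List Char)) (v : List Char) : List Char :=
  if op = some ("like".toList) then '%' :: v ++ ['%'] else v

def combine_fields_alt (params : List (String × String)) : List String × List String :=
  let named := params.map (fun fv => pvClassify fv.1.toList)
  (named.map (fun p => String.ofList (pvField p)),
   (named.zip (params.map (fun fv => fv.2))).map
     (fun pv => String.ofList (pvVal pv.1.2 pv.2.toList)))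

-- ===== PRECONDITION & SPEC =====
def Spec_combine_fields (params : List (String × String)) (out : List String × List String) : Prop := out = combine_fields_alt params
instance (params : List (String × String)) (out : List String × List String) : Decidable (Spec_combine_fields params out) := by unfold Spec_combine_fields; infer_instance

-- ===== CLAIM (what is proved, stated in full; the proofs are below) =====
def Claim_equal_combine_fields : Prop := ∀ (params : List (String × String)), Dom_combine_fields params → Spec_combine_fields params (combine_fields params)

-- ===== LEMMAS AND PROOFS =====

lemma pv_endswith_true_iff (s p : List Char) : PySem.Chars.endswith s p = true ↔ p <:+ s := by
  simp [PySem.Chars.endswith, List.isSuffixOf_iff_suffix]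

-- a ++ ['$'] is a prefix of t ++ '$' :: d' (no '$' in a or t) exactly when a = t
lemma pv_prefix_dollar (a t d' : List Char) (ha : '$' ∉ a) (ht : ∀ c ∈ t, c ≠ '$') :
    (a ++ ['$'] <+: t ++ '$' :: d') ↔ a = t := by
  induction a generalizing t with
  | nil =>
      cases t with
      | nil => simp
      | cons c t' =>
          have hc := ht c List.mem_cons_self
          constructor
          · intro hp
            rw [List.nil_append, List.cons_append] at hp
            rcases List.cons_prefix_cons.mp hp with ⟨h1, -⟩
            exact absurd h1.symm hc
          · intro h; cases h
  | cons x a' ih =>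
      cases t with
      | nil =>
          constructor
          · intro hp
            rw [List.cons_append, List.nil_append] at hp
            rcases List.cons_prefix_cons.mp hp with ⟨h1, -⟩
            exact absurd (h1 ▸ List.mem_cons_self) ha
          · intro h; cases h
      | cons c t' =>
          have ha' : '$' ∉ a' := fun h => ha (List.mem_cons_of_mem _ h)
          have ht' : ∀ u ∈ t', u ≠ '$' := fun u hu => ht u (List.mem_cons_of_mem _ hu)
          rw [List.cons_append, List.cons_append, List.cons_prefix_cons, ih t' ha' ht']
          constructor
          · rintro ⟨h1, h2⟩; rw [h1, h2]
          · intro h; injection h with h1 h2; exact ⟨h1, h2⟩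

-- A's endswith test on a field whose last '$' splits it as d'.reverse ++ '$' :: t.reverse
lemma pv_endswith_char (t d' : List Char) (ht : ∀ c ∈ t, c ≠ '$') (op : List Char) (hop : '$' ∉ op) :
    PySem.Chars.endswith (d'.reverse ++ '$' :: t.reverse) ('$' :: op) = decide (op = t.reverse) := by
  by_cases h : op = t.reverse
  · have hsuf : ('$' :: op) <:+ (d'.reverse ++ '$' :: t.reverse) := by
      rw [h]; exact ⟨d'.reverse, rfl⟩
    rw [(pv_endswith_true_iff _ _).mpr hsuf, decide_eq_true h]
  · have hno : ¬ (('$' :: op) <:+ (d'.reverse ++ '$' :: t.reverse)) := by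
      intro hsuf
      have hpre : ('$' :: op).reverse <+: (d'.reverse ++ '$' :: t.reverse).reverse :=
        List.reverse_prefix.mpr hsuf
      have hrw : (d'.reverse ++ '$' :: t.reverse).reverse = t ++ '$' :: d' := by simp
      rw [hrw] at hpre
      have hpre' : op.reverse ++ ['$'] <+: t ++ '$' :: d' := by simpa using hpre
      have heq : op.reverse = t := (pv_prefix_dollar op.reverse t d' (by simpa using hop) ht).mp hpre'
      exact h (by rw [← heq]; simp)
    have hb : PySem.Chars.endswith (d'.reverse ++ '$' :: t.reverse) ('$' :: op) = false :=
      Bool.eq_false_iff.mpr (fun hw => hno ((pv_endswith_true_iff _ _).mp hw))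
    rw [hb, decide_eq_false h]

-- the "$op" literals, split at the head '$'
lemma pv_cv1 : ("$like".toList : List Char) = '$' :: "like".toList := by decide
lemma pv_cv2 : ("$gt".toList : List Char) = '$' :: "gt".toList := by decide
lemma pv_cv3 : ("$gte".toList : List Char) = '$' :: "gte".toList := by decide
lemma pv_cv4 : ("$gl".toList : List Char) = '$' :: "gl".toList := by decide
lemma pv_cv5 : ("$gle".toList : List Char) = '$' :: "gle".toList := by decide

-- the per-key equality when the field DOES contain a '$' (t = reversed op part, no '$' in t)
set_option maxRecDepth 2000 in
lemma pv_entry_eq_core (t d' v : List Char) (ht : ∀ c ∈ t, c ≠ '$') :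
    (pvField (pvClassify2 t ('$' :: d') (d'.reverse ++ '$' :: t.reverse)),
     pvVal (pvClassify2 t ('$' :: d') (d'.reverse ++ '$' :: t.reverse)).2 v)
      = (pvFmtA (d'.reverse ++ '$' :: t.reverse), pvValA (d'.reverse ++ '$' :: t.reverse) v) := by
  by_cases k1 : t = (['e','k','i','l'] : List Char)
  · subst k1
    have E : ∀ (opl : List Char), '$' ∉ opl →
        PySem.Chars.endswith (d'.reverse ++ '$' :: (['e','k','i','l'] : List Char).reverse) ('$' :: opl)
          = decide (opl = (['e','k','i','l'] : List Char).reverse) :=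
      fun opl hop => pv_endswith_char ['e','k','i','l'] d' (by simp) opl hop
    have hlen : (d'.reverse ++ '$' :: (['e','k','i','l'] : List Char).reverse).length - 5 = d'.reverse.length := by
      rw [List.length_append, (by decide : ('$' :: (['e','k','i','l'] : List Char).reverse).length = 5)]
      omega
    have htake : (d'.reverse ++ '$' :: (['e','k','i','l'] : List Char).reverse).take
        ((d'.reverse ++ '$' :: (['e','k','i','l'] : List Char).reverse).length - 5) = d'.reverse := by
      rw [hlen]; exact List.take_left' rfl
    have hA : pvFmtA (d'.reverse ++ '$' :: (['e','k','i','l'] : List Char).reverse)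
        = '`' :: d'.reverse ++ "` like %s ".toList := by
      unfold pvFmtA
      rw [pv_cv1, E "like".toList (by decide), if_pos (by decide)]
      rw [PySem.List.slice_to_neg_ofNat _ 5 (by omega), htake]
    have hV : pvValA (d'.reverse ++ '$' :: (['e','k','i','l'] : List Char).reverse) v = '%' :: v ++ ['%'] := by
      unfold pvValA
      rw [pv_cv1, E "like".toList (by decide), if_pos (by decide)]
    have hC : pvClassify2 (['e','k','i','l'] : List Char) ('$' :: d')
        (d'.reverse ++ '$' :: (['e','k','i','l'] : List Char).reverse)
        = (d'.reverse, some ("like".toList : List Char)) := by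
      unfold pvClassify2
      rw [if_pos ⟨by simp, by decide⟩]
      simp
    rw [hC, hA, hV]
    unfold pvField pvVal
    rfl
  · by_cases k2 : t = (['t','g'] : List Char)
    · subst k2
      have E : ∀ (opl : List Char), '$' ∉ opl →
          PySem.Chars.endswith (d'.reverse ++ '$' :: (['t','g'] : List Char).reverse) ('$' :: opl)
            = decide (opl = (['t','g'] : List Char).reverse) :=
        fun opl hop => pv_endswith_char ['t','g'] d' (by simp) opl hop
      have hlen : (d'.reverse ++ '$' :: (['t','g'] : List Char).reverse).length - 3 = d'.reverse.length := by
        rw [List.length_append, (by decide : ('$' :: (['t','g'] : List Char).reverse).length = 3)]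
        omega
      have htake : (d'.reverse ++ '$' :: (['t','g'] : List Char).reverse).take
          ((d'.reverse ++ '$' :: (['t','g'] : List Char).reverse).length - 3) = d'.reverse := by
        rw [hlen]; exact List.take_left' rfl
      have hA : pvFmtA (d'.reverse ++ '$' :: (['t','g'] : List Char).reverse)
          = '`' :: d'.reverse ++ "` > %s ".toList := by
        unfold pvFmtA
        rw [pv_cv1, E "like".toList (by decide), if_neg (by decide)]
        rw [pv_cv2, E "gt".toList (by decide), if_pos (by decide)]
        rw [PySem.List.slice_to_neg_ofNat _ 3 (by omega), htake]
      have hV : pvValA (d'.reverse ++ '$' :: (['t','g'] : List Char).reverse) v = v := by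
        unfold pvValA
        rw [pv_cv1, E "like".toList (by decide), if_neg (by decide)]
      have hC : pvClassify2 (['t','g'] : List Char) ('$' :: d')
          (d'.reverse ++ '$' :: (['t','g'] : List Char).reverse)
          = (d'.reverse, some ("gt".toList : List Char)) := by
        unfold pvClassify2
        rw [if_pos ⟨by simp, by decide⟩]
        simp
      rw [hC, hA, hV]
      unfold pvField pvVal
      rfl
    · by_cases k3 : t = (['e','t','g'] : List Char)
      · subst k3
        have E : ∀ (opl : List Char), '$' ∉ opl →
            PySem.Chars.endswith (d'.reverse ++ '$' :: (['e','t','g'] : List Char).reverse) ('$' :: opl)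
              = decide (opl = (['e','t','g'] : List Char).reverse) :=
          fun opl hop => pv_endswith_char ['e','t','g'] d' (by simp) opl hop
        have hlen : (d'.reverse ++ '$' :: (['e','t','g'] : List Char).reverse).length - 4 = d'.reverse.length := by
          rw [List.length_append, (by decide : ('$' :: (['e','t','g'] : List Char).reverse).length = 4)]
          omega
        have htake : (d'.reverse ++ '$' :: (['e','t','g'] : List Char).reverse).take
            ((d'.reverse ++ '$' :: (['e','t','g'] : List Char).reverse).length - 4) = d'.reverse := by
          rw [hlen]; exact List.take_left' rfl
        have hA : pvFmtA (d'.reverse ++ '$' :: (['e','t','g'] : List Char).reverse)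
            = '`' :: d'.reverse ++ "` >= %s ".toList := by
          unfold pvFmtA
          rw [pv_cv1, E "like".toList (by decide), if_neg (by decide)]
          rw [pv_cv2, E "gt".toList (by decide), if_neg (by decide)]
          rw [pv_cv3, E "gte".toList (by decide), if_pos (by decide)]
          rw [PySem.List.slice_to_neg_ofNat _ 4 (by omega), htake]
        have hV : pvValA (d'.reverse ++ '$' :: (['e','t','g'] : List Char).reverse) v = v := by
          unfold pvValA
          rw [pv_cv1, E "like".toList (by decide), if_neg (by decide)]
        have hC : pvClassify2 (['e','t','g'] : List Char) ('$' :: d')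
            (d'.reverse ++ '$' :: (['e','t','g'] : List Char).reverse)
            = (d'.reverse, some ("gte".toList : List Char)) := by
          unfold pvClassify2
          rw [if_pos ⟨by simp, by decide⟩]
          simp
        rw [hC, hA, hV]
        unfold pvField pvVal
        rfl
      · by_cases k4 : t = (['l','g'] : List Char)
        · subst k4
          have E : ∀ (opl : List Char), '$' ∉ opl →
              PySem.Chars.endswith (d'.reverse ++ '$' :: (['l','g'] : List Char).reverse) ('$' :: opl)
                = decide (opl = (['l','g'] : List Char).reverse) :=
            fun opl hop => pv_endswith_char ['l','g'] d' (by simp) opl hop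
          have hlen : (d'.reverse ++ '$' :: (['l','g'] : List Char).reverse).length - 3 = d'.reverse.length := by
            rw [List.length_append, (by decide : ('$' :: (['l','g'] : List Char).reverse).length = 3)]
            omega
          have htake : (d'.reverse ++ '$' :: (['l','g'] : List Char).reverse).take
              ((d'.reverse ++ '$' :: (['l','g'] : List Char).reverse).length - 3) = d'.reverse := by
            rw [hlen]; exact List.take_left' rfl
          have hA : pvFmtA (d'.reverse ++ '$' :: (['l','g'] : List Char).reverse)
              = '`' :: d'.reverse ++ "` < %s ".toList := by
            unfold pvFmtA
            rw [pv_cv1, E "like".toList (by decide), if_neg (by decide)]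
            rw [pv_cv2, E "gt".toList (by decide), if_neg (by decide)]
            rw [pv_cv3, E "gte".toList (by decide), if_neg (by decide)]
            rw [pv_cv4, E "gl".toList (by decide), if_pos (by decide)]
            rw [PySem.List.slice_to_neg_ofNat _ 3 (by omega), htake]
          have hV : pvValA (d'.reverse ++ '$' :: (['l','g'] : List Char).reverse) v = v := by
            unfold pvValA
            rw [pv_cv1, E "like".toList (by decide), if_neg (by decide)]
          have hC : pvClassify2 (['l','g'] : List Char) ('$' :: d')
              (d'.reverse ++ '$' :: (['l','g'] : List Char).reverse)
              = (d'.reverse, some ("gl".toList : List Char)) := by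
            unfold pvClassify2
            rw [if_pos ⟨by simp, by decide⟩]
            simp
          rw [hC, hA, hV]
          unfold pvField pvVal
          rfl
        · by_cases k5 : t = (['e','l','g'] : List Char)
          · subst k5
            have E : ∀ (opl : List Char), '$' ∉ opl →
                PySem.Chars.endswith (d'.reverse ++ '$' :: (['e','l','g'] : List Char).reverse) ('$' :: opl)
                  = decide (opl = (['e','l','g'] : List Char).reverse) :=
              fun opl hop => pv_endswith_char ['e','l','g'] d' (by simp) opl hop
            have hlen : (d'.reverse ++ '$' :: (['e','l','g'] : List Char).reverse).length - 4 = d'.reverse.length := by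
              rw [List.length_append, (by decide : ('$' :: (['e','l','g'] : List Char).reverse).length = 4)]
              omega
            have htake : (d'.reverse ++ '$' :: (['e','l','g'] : List Char).reverse).take
                ((d'.reverse ++ '$' :: (['e','l','g'] : List Char).reverse).length - 4) = d'.reverse := by
              rw [hlen]; exact List.take_left' rfl
            have hA : pvFmtA (d'.reverse ++ '$' :: (['e','l','g'] : List Char).reverse)
                = '`' :: d'.reverse ++ "` <= %s ".toList := by
              unfold pvFmtA
              rw [pv_cv1, E "like".toList (by decide), if_neg (by decide)]
              rw [pv_cv2, E "gt".toList (by decide), if_neg (by decide)]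
              rw [pv_cv3, E "gte".toList (by decide), if_neg (by decide)]
              rw [pv_cv4, E "gl".toList (by decide), if_neg (by decide)]
              rw [pv_cv5, E "gle".toList (by decide), if_pos (by decide)]
              rw [PySem.List.slice_to_neg_ofNat _ 4 (by omega), htake]
            have hV : pvValA (d'.reverse ++ '$' :: (['e','l','g'] : List Char).reverse) v = v := by
              unfold pvValA
              rw [pv_cv1, E "like".toList (by decide), if_neg (by decide)]
            have hC : pvClassify2 (['e','l','g'] : List Char) ('$' :: d')
                (d'.reverse ++ '$' :: (['e','l','g'] : List Char).reverse)
                = (d'.reverse, some ("gle".toList : List Char)) := by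
              unfold pvClassify2
              rw [if_pos ⟨by simp, by decide⟩]
              simp
            rw [hC, hA, hV]
            unfold pvField pvVal
            rfl
          · -- not a recognised operator: both sides fall to the default format
            have n1 : ¬ ((['l','i','k','e'] : List Char) = t.reverse) :=
              fun h => k1 (by rw [← List.reverse_reverse t, ← h]; decide)
            have b1 : ((['l','i','k','e'] : List Char) == t.reverse) = false := beq_eq_false_iff_ne.mpr n1
            have n2 : ¬ ((['g','t'] : List Char) = t.reverse) :=
              fun h => k2 (by rw [← List.reverse_reverse t, ← h]; decide)
            have b2 : ((['g','t'] : List Char) == t.reverse) = false := beq_eq_false_iff_ne.mpr n2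
            have n3 : ¬ ((['g','t','e'] : List Char) = t.reverse) :=
              fun h => k3 (by rw [← List.reverse_reverse t, ← h]; decide)
            have b3 : ((['g','t','e'] : List Char) == t.reverse) = false := beq_eq_false_iff_ne.mpr n3
            have n4 : ¬ ((['g','l'] : List Char) = t.reverse) :=
              fun h => k4 (by rw [← List.reverse_reverse t, ← h]; decide)
            have b4 : ((['g','l'] : List Char) == t.reverse) = false := beq_eq_false_iff_ne.mpr n4
            have n5 : ¬ ((['g','l','e'] : List Char) = t.reverse) :=
              fun h => k5 (by rw [← List.reverse_reverse t, ← h]; decide)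
            have b5 : ((['g','l','e'] : List Char) == t.reverse) = false := beq_eq_false_iff_ne.mpr n5
            have E : ∀ (opl : List Char), '$' ∉ opl →
                PySem.Chars.endswith (d'.reverse ++ '$' :: t.reverse) ('$' :: opl) = decide (opl = t.reverse) :=
              fun opl hop => pv_endswith_char t d' ht opl hop
            have hA : pvFmtA (d'.reverse ++ '$' :: t.reverse)
                = '`' :: (d'.reverse ++ '$' :: t.reverse) ++ "` =%s ".toList := by
              unfold pvFmtA
              rw [pv_cv1, E "like".toList (by decide), if_neg (by simpa using n1)]
              rw [pv_cv2, E "gt".toList (by decide), if_neg (by simpa using n2)]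
              rw [pv_cv3, E "gte".toList (by decide), if_neg (by simpa using n3)]
              rw [pv_cv4, E "gl".toList (by decide), if_neg (by simpa using n4)]
              rw [pv_cv5, E "gle".toList (by decide), if_neg (by simpa using n5)]
            have hV : pvValA (d'.reverse ++ '$' :: t.reverse) v = v := by
              unfold pvValA
              rw [pv_cv1, E "like".toList (by decide), if_neg (by simpa using n1)]
            have hitems : pvJoin.items = [("like".toList, " like ".toList),
                ("gt".toList, " > ".toList), ("gte".toList, " >= ".toList),
                ("gl".toList, " < ".toList), ("gle".toList, " <= ".toList)] := by decide
            have hget : PySem.Dict.get? pvJoin t.reverse = none := by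
              unfold PySem.Dict.get?
              rw [hitems]
              simp [List.find?, b1, b2, b3, b4, b5]
            have hcont : PySem.Dict.contains pvJoin t.reverse = false := by
              rw [PySem.Dict.contains_eq_isSome_get?, hget]; rfl
            have hC : pvClassify2 t ('$' :: d') (d'.reverse ++ '$' :: t.reverse)
                = (d'.reverse ++ '$' :: t.reverse, none) := by
              unfold pvClassify2
              rw [if_neg (by rw [hcont]; simp)]
            rw [hC, hA, hV]
            unfold pvField pvVal
            rfl

-- the per-key equality, all fields
lemma pv_entry_eq (f v : List Char) :
    (pvField (pvClassify f), pvVal (pvClassify f).2 v) = (pvFmtA f, pvValA f v) := by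
  obtain ⟨t, hT⟩ : ∃ t, f.reverse.takeWhile (fun c : Char => c ≠ '$') = t := ⟨_, rfl⟩
  have hsplit := List.takeWhile_append_dropWhile (p := fun c : Char => decide (c ≠ '$')) (l := f.reverse)
  have ht : ∀ c ∈ t, c ≠ '$' := by
    intro c hc
    have := List.mem_takeWhile_imp (hT ▸ hc)
    simpa using this
  rcases hd : f.reverse.dropWhile (fun c : Char => c ≠ '$') with _ | ⟨c, d'⟩
  · -- no '$' in f at all: both sides take the default branch
    have hfr : t = f.reverse := by
      rw [hd, List.append_nil] at hsplit
      rw [← hT, hsplit]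
    have hnd : '$' ∉ f := by
      intro hm
      exact ht '$' (by rw [hfr]; exact List.mem_reverse.mpr hm) rfl
    have hends : ∀ p : List Char, '$' ∈ p → PySem.Chars.endswith f p = false := by
      intro p hp
      exact Bool.eq_false_iff.mpr
        (fun hw => hnd (((pv_endswith_true_iff _ _).mp hw).sublist.subset hp))
    have hA : pvFmtA f = '`' :: f ++ "` =%s ".toList := by
      unfold pvFmtA
      rw [hends "$like".toList (by decide), if_neg (by simp)]
      rw [hends "$gt".toList (by decide), if_neg (by simp)]
      rw [hends "$gte".toList (by decide), if_neg (by simp)]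
      rw [hends "$gl".toList (by decide), if_neg (by simp)]
      rw [hends "$gle".toList (by decide), if_neg (by simp)]
    have hV : pvValA f v = v := by
      unfold pvValA
      rw [hends "$like".toList (by decide), if_neg (by simp)]
    have hC : pvClassify f = (f, none) := by
      unfold pvClassify pvClassify2
      rw [hd, hT]
      rw [if_neg (by simp)]
    rw [hC, hA, hV]
    unfold pvField pvVal
    rfl
  · -- the field splits at its last '$'
    have hc : c = '$' := by
      have hne : f.reverse.dropWhile (fun c : Char => c ≠ '$') ≠ [] := by rw [hd]; simp
      have haux : ∀ (L : List Char), L = c :: d' → (hL : L ≠ []) →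
          decide ((L.head hL) ≠ '$') = false → c = '$' := by
        rintro L rfl hL h0; simpa using h0
      exact haux _ hd hne (List.head_dropWhile_not _ hne)
    subst hc
    have hf : f = d'.reverse ++ '$' :: t.reverse := by
      have h1 : f.reverse = t ++ '$' :: d' := by
        rw [hd, hT] at hsplit
        exact hsplit.symm
      have h2 := congrArg List.reverse h1
      simpa using h2
    have hL : pvClassify f = pvClassify2 t ('$' :: d') f := by
      unfold pvClassify; rw [hd, hT]
    rw [hL, hf]
    exact pv_entry_eq_core t d' v ht

-- A's foldl with singleton appends, with the accumulator generalised
lemma pv_fold (params : List (String × String)) (acc1 acc2 : List String) :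
    params.foldl
      (fun acc fv =>
        (acc.1 ++ [String.ofList (pvFmtA fv.1.toList)],
         acc.2 ++ [String.ofList (pvValA fv.1.toList fv.2.toList)]))
      (acc1, acc2)
    = (acc1 ++ params.map (fun fv => String.ofList (pvFmtA fv.1.toList)),
       acc2 ++ params.map (fun fv => String.ofList (pvValA fv.1.toList fv.2.toList))) := by
  induction params generalizing acc1 acc2 with
  | nil => simp
  | cons fv rest ih => simp [List.foldl_cons, ih]

-- the two component equalities of pv_entry_eq, split out
lemma pv_field_eq (f : List Char) : pvField (pvClassify f) = pvFmtA f :=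
  congrArg Prod.fst (pv_entry_eq f [])
lemma pv_val_eq (f v : List Char) : pvVal (pvClassify f).2 v = pvValA f v :=
  congrArg Prod.snd (pv_entry_eq f v)

-- ===== VERDICT (by name: the statement is the Claim_ definition above) =====
theorem combine_fields_spec : Claim_equal_combine_fields := by
  intro params _
  unfold Spec_combine_fields combine_fields combine_fields_alt
  rw [pv_fold params [] []]
  simp only [List.nil_append, Prod.mk.injEq]
  constructor
  · rw [List.map_map]
    exact List.map_congr_left (fun fv _ => (congrArg String.ofList (pv_field_eq fv.1.toList)).symm)
  · rw [List.zip_map', List.map_map]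
    exact List.map_congr_left (fun fv _ => (congrArg String.ofList (pv_val_eq fv.1.toList fv.2.toList)).symm)
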